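-- pv_equiv track=rewrite | github.com/3rr4t1c/social-sim-vs-reality | src/metrics/aggregator.py | aggregate_simulation_metrics
-- ===== SOURCE A (Python) =====
-- from typing import Dict, Any, List
-- from collections import defaultdict
--
-- def aggregate_simulation_metrics(
--     runs_metrics: List[Dict[str, Any]],
-- ) -> Dict[str, List[Any]]:
--     """
--     Aggregate metrics from multiple simulation runs.
--
--     Args:
--         runs_metrics: List of metric dictionaries from individual runs
--
--     Returns:
--         Dictionary where each key maps to a list of values across runs
--     """
--     aggregated: Dict[str, List[Any]] = defaultdict(list)
--
--     for run_metrics in runs_metrics: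
--         for key, value in run_metrics.items():
--             aggregated[key].append(value)
--
--     return dict(aggregated)
-- ===== SOURCE B (Python) =====
-- def aggregate_simulation_metrics(runs_metrics):
--     """Key-major re-implementation: collect the observed keys first (first-appearance
--     order, with a seen-set), then build each key's value list with one
--     comprehension over the runs."""
--     all_keys = []
--     seen = set()
--     for run in runs_metrics:
--         for key in run:
--             if key not in seen:
--                 seen.add(key)
--                 all_keys.append(key)
--     return {key: [run[key] for run in runs_metrics if key in run] for key in all_keys}
-- ===== Notes on version B (the rewrite author's own statement) =====
-- stated objective: alternative
-- what changed: B inverts the loop nesting: instead of growing a defaultdict value-by-value over runs, it first collects the observed keys in first-appearance order and then builds each key's value list with one membership-filtered pass over the runs.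
import Mathlib
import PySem

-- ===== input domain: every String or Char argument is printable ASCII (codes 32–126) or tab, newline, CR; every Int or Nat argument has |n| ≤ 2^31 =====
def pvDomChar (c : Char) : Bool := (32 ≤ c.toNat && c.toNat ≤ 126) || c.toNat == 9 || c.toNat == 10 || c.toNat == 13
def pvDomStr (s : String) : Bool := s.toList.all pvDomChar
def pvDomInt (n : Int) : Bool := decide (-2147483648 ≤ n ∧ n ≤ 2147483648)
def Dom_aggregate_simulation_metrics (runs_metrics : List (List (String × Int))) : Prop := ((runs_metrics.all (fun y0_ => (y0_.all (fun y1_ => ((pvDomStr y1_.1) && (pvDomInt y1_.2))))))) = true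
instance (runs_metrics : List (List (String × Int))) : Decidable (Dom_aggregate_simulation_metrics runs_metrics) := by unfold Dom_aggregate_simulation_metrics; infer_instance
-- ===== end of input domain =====

-- B reverses the loop nesting: it first collects the observed keys in first-appearance
-- order, then builds each key's value list with one pass over the runs (objective: alternative).


-- ===== PORT A =====
-- for run_metrics in runs_metrics: for key, value in run_metrics.items(): aggregated[key].append(value)
-- (defaultdict(list): aggregated[key].append(v) is modify key [] (· ++ [v])); return dict(aggregated) = .items
def aggregate_simulation_metrics (runs_metrics : List (List (String × Int))) : List (String × List Int) :=
  (runs_metrics.foldl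
    (fun d run_metrics =>
      run_metrics.foldl (fun d kv => d.modify kv.1 [] (fun vs => vs ++ [kv.2])) d)
    (PySem.Dict.empty : PySem.Dict String (List Int))).items

-- ===== PORT B =====
-- all_keys list + seen set accumulated together, exactly as in Source B
def pvAllKeysLoop (runs_metrics : List (List (String × Int))) : List String × PySem.Set String :=
  runs_metrics.foldl
    (fun st run =>
      run.foldl
        (fun st kv =>
          if PySem.Set.contains st.2 kv.1 then st
          else (st.1 ++ [kv.1], PySem.Set.add st.2 kv.1))
        st)
    ([], PySem.Set.empty)

def pvAllKeys (runs_metrics : List (List (String × Int))) : List String :=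
  (pvAllKeysLoop runs_metrics).1

-- {key: [run[key] for run in runs_metrics if key in run] for key in all_keys}
def aggregate_simulation_metrics_alt (runs_metrics : List (List (String × Int))) : List (String × List Int) :=
  (pvAllKeys runs_metrics).map
    (fun key => (key, runs_metrics.filterMap (fun run => (PySem.Dict.mk run).get? key)))

-- ===== PRECONDITION & SPEC =====
-- Pre_ excludes association lists with duplicate keys inside one run: they cannot arise
-- from a Python dict (dict[str, Any]), so both programs' behaviour there is unspecified.
def Pre_aggregate_simulation_metrics (runs_metrics : List (List (String × Int))) : Prop :=
  ∀ run ∈ runs_metrics, (run.map Prod.fst).Nodup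
instance (runs_metrics : List (List (String × Int))) : Decidable (Pre_aggregate_simulation_metrics runs_metrics) := by unfold Pre_aggregate_simulation_metrics; infer_instance

def pvWitness_aggregate_simulation_metrics : (List (List (String × Int))) :=
  [[("a", 1), ("b", 2)], [("a", 3)], []]

def Spec_aggregate_simulation_metrics (runs_metrics : List (List (String × Int))) (out : List (String × List Int)) : Prop := out = aggregate_simulation_metrics_alt runs_metrics
instance (runs_metrics : List (List (String × Int))) (out : List (String × List Int)) : Decidable (Spec_aggregate_simulation_metrics runs_metrics out) := by unfold Spec_aggregate_simulation_metrics; infer_instance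

-- ===== CLAIM (what is proved, stated in full; the proofs are below) =====
def Claim_equal_aggregate_simulation_metrics : Prop := ∀ (runs_metrics : List (List (String × Int))), Dom_aggregate_simulation_metrics runs_metrics → Pre_aggregate_simulation_metrics runs_metrics → Spec_aggregate_simulation_metrics runs_metrics (aggregate_simulation_metrics runs_metrics)

-- ===== LEMMAS AND PROOFS =====

-- The nested fold of either port is the same fold over the flattened pair list.
theorem pvA_flatten (runs_metrics : List (List (String × Int))) :
    aggregate_simulation_metrics runs_metrics =
      (runs_metrics.flatten.foldl (fun d kv => d.modify kv.1 [] (fun vs => vs ++ [kv.2]))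
        (PySem.Dict.empty : PySem.Dict String (List Int))).items := by
  simp [aggregate_simulation_metrics, List.foldl_flatten]

-- The (all_keys, seen) pair stays on the diagonal: both components are the same list.
theorem pvKeysLoop_diag (ps : List (String × Int)) (s : PySem.Set String) :
    ps.foldl
        (fun st kv =>
          if PySem.Set.contains st.2 kv.1 then st
          else (st.1 ++ [kv.1], PySem.Set.add st.2 kv.1))
        (s, s)
      = (ps.foldl (fun t kv => PySem.Set.add t kv.1) s,
         ps.foldl (fun t kv => PySem.Set.add t kv.1) s) := by
  induction ps generalizing s with
  | nil => rfl
  | cons kv rest ih =>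
    by_cases h : PySem.Set.contains s kv.1 = true
    · rw [List.foldl_cons, if_pos h, List.foldl_cons,
        show PySem.Set.add s kv.1 = s by
          have hm := h; simp [PySem.Set.contains] at hm; simp [PySem.Set.add, hm]]
      exact ih s
    · rw [List.foldl_cons, if_neg h, List.foldl_cons,
        show PySem.Set.add s kv.1 = s ++ [kv.1] by
          have hm := h; simp [PySem.Set.contains] at hm; simp [PySem.Set.add, hm]]
      exact ih (s ++ [kv.1])

-- B's key accumulation is PySem.Set.ofList of the flattened key stream.
theorem pvKeys_eq_ofList (runs_metrics : List (List (String × Int))) :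
    pvAllKeys runs_metrics = PySem.Set.ofList (runs_metrics.flatten.map Prod.fst) := by
  have hflat : pvAllKeysLoop runs_metrics =
      runs_metrics.flatten.foldl
        (fun st kv =>
          if PySem.Set.contains st.2 kv.1 then st
          else (st.1 ++ [kv.1], PySem.Set.add st.2 kv.1))
        ([], PySem.Set.empty) := by
    simp [pvAllKeysLoop, List.foldl_flatten]
  rw [pvAllKeys, hflat, show (([], PySem.Set.empty) : List String × PySem.Set String)
      = ((PySem.Set.empty : PySem.Set String), (PySem.Set.empty : PySem.Set String)) from rfl,
    pvKeysLoop_diag, ← PySem.Set.update_nil_left, PySem.Set.update_map_eq_foldl_add]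
  rfl

theorem pvFilterMap_toList {α β : Type} (l : List α) (f : α → Option β) :
    l.filterMap f = (l.map (fun x => (f x).toList)).flatten := by
  induction l with
  | nil => rfl
  | cons a t ih => cases h : f a <;> simp [h, ih]

-- In a run representing a dict (nodup keys), filtering the pairs at a key yields
-- exactly the optional lookup value.
theorem pvFilter_eq_get? (run : List (String × Int)) (key : String)
    (h : (run.map Prod.fst).Nodup) :
    ((run.filter (fun p => p.1 == key)).map Prod.snd) =
      ((PySem.Dict.mk run).get? key).toList := by
  induction run with
  | nil => rfl
  | cons p t ih =>
    obtain ⟨k, v⟩ := p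
    simp only [List.map_cons, List.nodup_cons] at h
    by_cases hk : k = key
    · subst hk
      have ht : t.filter (fun q => q.1 == k) = [] := by
        apply List.filter_eq_nil_iff.mpr
        intro q hq hbeq
        exact h.1 (List.mem_map.mpr ⟨q, hq, beq_iff_eq.mp hbeq⟩)
      simp [ht, PySem.Dict.get?_mk_cons]
    · simp [PySem.Dict.get?_mk_cons, hk, ih h.2]

theorem pvAvalue (runs_metrics : List (List (String × Int))) (key : String)
    (hpre : Pre_aggregate_simulation_metrics runs_metrics) :
    ((runs_metrics.flatten.filter (fun p => p.1 == key)).map Prod.snd) =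
      runs_metrics.filterMap (fun run => (PySem.Dict.mk run).get? key) := by
  rw [pvFilterMap_toList, List.filter_flatten, List.map_flatten, List.map_map]
  congr 1
  exact List.map_congr_left (fun run hrun => pvFilter_eq_get? run key (hpre run hrun))

-- ===== VERDICT (by name: the statement is the Claim_ definition above) =====
theorem aggregate_simulation_metrics_spec : Claim_equal_aggregate_simulation_metrics := by
  intro runs_metrics _ hpre
  show _ = _
  rw [pvA_flatten, aggregate_simulation_metrics_alt, pvKeys_eq_ofList]
  set step := fun (d : PySem.Dict String (List Int)) (kv : String × Int) =>
    d.modify kv.1 [] (fun vs => vs ++ [kv.2]) with hstep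
  have hnd : (runs_metrics.flatten.foldl step PySem.Dict.empty).keys.Nodup := by
    exact PySem.Dict.nodup_keys_foldl_modify_key _ Prod.fst [] _ _ PySem.Dict.nodup_keys_empty
  rw [PySem.Dict.items_eq_map_keys _ hnd []]
  have hkeys : (runs_metrics.flatten.foldl step PySem.Dict.empty).keys
      = PySem.Set.ofList (runs_metrics.flatten.map Prod.fst) := by
    rw [hstep, PySem.Dict.keys_foldl_modify_key]
    simp [PySem.Dict.keys_empty, PySem.Set.update_nil_left]
  rw [hkeys]
  apply List.map_congr_left
  intro key _
  have hv := PySem.Dict.getD_foldl_modify_append runs_metrics.flatten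
    (PySem.Dict.empty : PySem.Dict String (List Int)) key
  rw [hstep]
  rw [hv, PySem.Dict.getD_empty, List.nil_append, pvAvalue runs_metrics key hpre]
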